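-- pv_equiv track=rewrite | github.com/attilasarandi/HaziFeladat | 1.py | feladat_17
-- ===== SOURCE A (Python) =====
-- def feladat_17(szam):
--     m=szam
--     uj=0
--     while szam>0:
--         b=szam%10
--         uj=uj*10+b
--         szam=szam//10
--     return uj==m
-- ===== SOURCE B (Python) =====
-- def feladat_17(szam):
--     if szam < 0:
--         return False
--     digits = []
--     t = szam
--     while t > 0:
--         digits.append(t % 10)
--         t //= 10
--     return digits == digits[::-1]
-- ===== Notes on version B (the rewrite author's own statement) =====
-- stated objective: alternative
-- what changed: B extracts the digits into an explicit list and compares the list with its reverse (with an early False for negatives), instead of accumulating a reversed integer inline and comparing it to the original number.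
import Mathlib
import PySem

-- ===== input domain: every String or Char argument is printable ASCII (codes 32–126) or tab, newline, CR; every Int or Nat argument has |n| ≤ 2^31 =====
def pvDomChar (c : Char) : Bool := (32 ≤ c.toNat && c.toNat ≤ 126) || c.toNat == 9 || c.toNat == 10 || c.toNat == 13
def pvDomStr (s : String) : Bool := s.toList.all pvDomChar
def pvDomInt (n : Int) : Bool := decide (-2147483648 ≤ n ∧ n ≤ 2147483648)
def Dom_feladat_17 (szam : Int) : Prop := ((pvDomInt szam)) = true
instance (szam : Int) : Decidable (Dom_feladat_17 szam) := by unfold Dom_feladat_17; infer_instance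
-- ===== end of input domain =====

-- B builds the explicit digit list and compares it with its reverse, instead of
-- A's inline accumulation of a reversed integer; alternative decomposition, same cost.

-- ===== PORT A =====
-- the while-loop of A: state (szam, uj)
def pvLoopA (szam uj : Int) : Int :=
  if _h : szam > 0 then
    pvLoopA (PySem.Int.floordiv szam 10) (uj * 10 + PySem.Int.mod szam 10)
  else uj
termination_by szam.toNat
decreasing_by
  rw [PySem.Int.floordiv_eq_ediv_of_pos (by norm_num)]
  omega

def feladat_17 (szam : Int) : Bool := pvLoopA szam 0 == szam

-- ===== PORT B =====
-- the while-loop of B: appends t % 10, then t //= 10 (list built front-to-back,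
-- here produced as head :: rest of the recursion — same order)
def pvDigits (t : Int) : List Int :=
  if h : t > 0 then PySem.Int.mod t 10 :: pvDigits (PySem.Int.floordiv t 10) else []
termination_by t.toNat
decreasing_by
  rw [PySem.Int.floordiv_eq_ediv_of_pos (by norm_num)]
  omega

def feladat_17_alt (szam : Int) : Bool :=
  if szam < 0 then false
  else pvDigits szam == (pvDigits szam).reverse

-- ===== PRECONDITION & SPEC =====
def Spec_feladat_17 (szam : Int) (out : Bool) : Prop := out = feladat_17_alt szam
instance (szam : Int) (out : Bool) : Decidable (Spec_feladat_17 szam out) := by unfold Spec_feladat_17; infer_instance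

-- ===== CLAIM (what is proved, stated in full; the proofs are below) =====
def Claim_equal_feladat_17 : Prop := ∀ (szam : Int), Dom_feladat_17 szam → Spec_feladat_17 szam (feladat_17 szam)

-- ===== LEMMAS AND PROOFS =====

-- numeric value of a least-significant-first digit list
def pvVal (l : List Int) : Int := l.foldr (fun d acc => d + 10 * acc) 0

theorem pvVal_nil : pvVal [] = 0 := rfl
theorem pvVal_cons (d : Int) (t : List Int) : pvVal (d :: t) = d + 10 * pvVal t := rfl

theorem pvDigits_of_nonpos {t : Int} (h : ¬ t > 0) : pvDigits t = [] := by
  rw [pvDigits]; simp [h]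

theorem pvVal_digits {t : Int} (h : 0 ≤ t) : pvVal (pvDigits t) = t := by
  induction t using pvDigits.induct with
  | case1 t ht ih =>
    rw [pvDigits, dif_pos ht, pvVal_cons,
        PySem.Int.floordiv_eq_ediv_of_pos (by norm_num),
        PySem.Int.mod_eq_emod_of_pos (by norm_num)]
    rw [PySem.Int.floordiv_eq_ediv_of_pos (by norm_num)] at ih
    have := ih (by omega)
    omega
  | case2 t ht => rw [pvDigits_of_nonpos ht, pvVal_nil]; omega

theorem pvDigits_mem {t d : Int} (h : d ∈ pvDigits t) : 0 ≤ d ∧ d < 10 := by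
  induction t using pvDigits.induct with
  | case1 t ht ih =>
    rw [pvDigits, dif_pos ht] at h
    rcases List.mem_cons.1 h with h | h
    · subst h
      rw [PySem.Int.mod_eq_emod_of_pos (by norm_num)]
      omega
    · exact ih h
  | case2 t ht => rw [pvDigits_of_nonpos ht] at h; cases h

theorem pvLoopA_eq_foldl (t : Int) :
    ∀ c : Int, pvLoopA t c = (pvDigits t).foldl (fun acc d => acc * 10 + d) c := by
  induction t using pvDigits.induct with
  | case1 t ht ih =>
    intro c
    rw [pvLoopA, dif_pos ht, pvDigits, dif_pos ht, List.foldl_cons, ih]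
  | case2 t ht =>
    intro c
    rw [pvLoopA, dif_neg ht, pvDigits_of_nonpos ht, List.foldl_nil]

theorem pvVal_append_singleton (l : List Int) (d : Int) :
    pvVal (l ++ [d]) = pvVal l + d * 10 ^ l.length := by
  induction l with
  | nil => simp [pvVal_nil, pvVal_cons]
  | cons x t ih =>
    rw [List.cons_append, pvVal_cons, pvVal_cons, ih, List.length_cons, pow_succ]
    ring

theorem pvFoldl_val (l : List Int) :
    ∀ c : Int, l.foldl (fun acc d => acc * 10 + d) c = pvVal l.reverse + c * 10 ^ l.length := by
  induction l with
  | nil => intro c; simp [pvVal_nil]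
  | cons d t ih =>
    intro c
    rw [List.foldl_cons, ih, List.reverse_cons, pvVal_append_singleton,
        List.length_reverse, List.length_cons, pow_succ]
    ring

theorem pvVal_nonneg {l : List Int} (h : ∀ d ∈ l, 0 ≤ d ∧ d < 10) : 0 ≤ pvVal l := by
  induction l with
  | nil => simp [pvVal_nil]
  | cons d t ih =>
    rw [pvVal_cons]
    have h1 := h d (List.mem_cons_self ..)
    have h2 := ih (fun d hd => h d (List.mem_cons_of_mem _ hd))
    omega

theorem pvVal_inj : ∀ (l1 l2 : List Int), l1.length = l2.length →
    (∀ d ∈ l1, 0 ≤ d ∧ d < 10) → (∀ d ∈ l2, 0 ≤ d ∧ d < 10) →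
    pvVal l1 = pvVal l2 → l1 = l2 := by
  intro l1
  induction l1 with
  | nil => intro l2 hlen _ _ _; exact (List.eq_nil_of_length_eq_zero hlen.symm).symm
  | cons d1 t1 ih =>
    intro l2 hlen h1 h2 hval
    cases l2 with
    | nil => simp at hlen
    | cons d2 t2 =>
      rw [pvVal_cons, pvVal_cons] at hval
      have hd1 := h1 d1 (List.mem_cons_self ..)
      have hd2 := h2 d2 (List.mem_cons_self ..)
      have ht1 : ∀ d ∈ t1, 0 ≤ d ∧ d < 10 := fun d hd => h1 d (List.mem_cons_of_mem _ hd)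
      have ht2 : ∀ d ∈ t2, 0 ≤ d ∧ d < 10 := fun d hd => h2 d (List.mem_cons_of_mem _ hd)
      have hv1 := pvVal_nonneg ht1
      have hv2 := pvVal_nonneg ht2
      have hd : d1 = d2 := by omega
      have hv : pvVal t1 = pvVal t2 := by omega
      have := ih t2 (by simpa using hlen) ht1 ht2 hv
      rw [hd, this]

-- ===== VERDICT (by name: the statement is the Claim_ definition above) =====
theorem feladat_17_spec : Claim_equal_feladat_17 := by
  intro szam _
  unfold Spec_feladat_17 feladat_17 feladat_17_alt
  by_cases hneg : szam < 0
  · rw [if_pos hneg, pvLoopA, dif_neg (by omega)]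
    exact beq_eq_false_iff_ne.mpr (by omega)
  · rw [if_neg hneg]
    have h0 : 0 ≤ szam := by omega
    have hA : pvLoopA szam 0 = pvVal (pvDigits szam).reverse := by
      rw [pvLoopA_eq_foldl, pvFoldl_val]; ring
    have hv : pvVal (pvDigits szam) = szam := pvVal_digits h0
    set v := pvDigits szam with hvdef
    rw [Bool.eq_iff_iff]
    simp only [beq_iff_eq]
    rw [hA, ← hv]
    constructor
    · intro h
      exact (pvVal_inj _ _ (by simp) (fun d hd => pvDigits_mem (hvdef ▸ List.mem_reverse.1 hd))
        (fun d hd => pvDigits_mem (hvdef ▸ hd)) h).symm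
    · intro h; rw [← h]
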